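-- pv_equiv track=rewrite | github.com/nfarabullini/Master-Thesis | DTW_index_calc.py | construct_upper_MBRs
-- ===== SOURCE A (Python) =====
-- def construct_upper_MBRs(series, N):
--     n = len(series) // N
--     entry = 0
--     ls_i = []
--     for i in range(1, N + 1):
--         range_entries = n*i
--         ls_j = []
--         for j in range(entry, range_entries):
--             ls_j.append(series[j])
--         ls_i.append(ls_j)
--         entry = range_entries
--     u_a = []
--     for w in range(0, len(ls_i)):
--         max_val = max(ls_i[w])
--         for z in range(len(ls_i[w])):
--             u_a.append(max_val)
--     return u_a
-- ===== SOURCE B (Python) =====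
-- def construct_upper_MBRs(series, N):
--     # One streaming pass with a running-max accumulator: no list-of-lists, no
--     # slicing per block, no separate max() pass.
--     n = len(series) // N
--     out = []
--     cnt = 0
--     cur = 0
--     for x in series[:n * N]:
--         cur = x if cnt == 0 else max(cur, x)
--         cnt += 1
--         if cnt == n:
--             out.extend([cur] * n)
--             cnt = 0
--     return out
-- ===== Notes on version B (the rewrite author's own statement) =====
-- stated objective: faster
-- what changed: Replaces A's staged computation (materialise a list-of-lists of blocks element by element, then a second double loop calling max() per block) with one streaming pass over the series that maintains a running maximum and a position counter and flushes n copies of the running max at each block boundary; no intermediate list-of-lists is built.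
import Mathlib
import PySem

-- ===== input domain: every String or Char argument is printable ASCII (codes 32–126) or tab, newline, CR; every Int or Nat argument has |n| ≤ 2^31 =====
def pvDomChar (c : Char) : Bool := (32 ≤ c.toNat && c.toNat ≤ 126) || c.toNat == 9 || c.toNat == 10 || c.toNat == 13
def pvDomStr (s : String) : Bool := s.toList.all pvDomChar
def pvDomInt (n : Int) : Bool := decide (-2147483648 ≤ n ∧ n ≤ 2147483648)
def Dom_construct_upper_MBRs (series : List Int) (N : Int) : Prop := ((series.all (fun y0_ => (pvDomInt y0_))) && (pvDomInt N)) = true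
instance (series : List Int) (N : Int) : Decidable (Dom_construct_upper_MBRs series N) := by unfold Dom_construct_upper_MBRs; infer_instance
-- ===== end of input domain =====

-- B replaces A's staged computation (build a list-of-lists of blocks, then a second
-- double loop with max() per block) by ONE streaming pass over the series with a
-- running-max accumulator and a counter that flushes n copies at each block boundary.

-- ===== PORT A =====
def construct_upper_MBRs (series : List Int) (N : Int) : List Int :=
  let n := PySem.Int.floordiv (PySem.List.len series) N
  -- for i in range(1, N+1): build ls_j by appending series[j] for j in range(entry, n*i)
  let st := (PySem.List.pyRange 1 (N + 1) 1).foldl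
    (fun (st : List (List Int) × Int) i =>
      let range_entries := n * i
      let ls_j := (PySem.List.pyRange st.2 range_entries 1).foldl
        (fun acc j => acc ++ [PySem.List.pyGetD series j 0]) []
      (st.1 ++ [ls_j], range_entries)) ([], 0)
  let ls_i := st.1
  -- for w in range(len(ls_i)): append max(ls_i[w]) len(ls_i[w]) times
  (PySem.List.pyRange 0 (PySem.List.len ls_i) 1).foldl
    (fun u_a w =>
      let blk := PySem.List.pyGetD ls_i w []
      let max_val := (PySem.List.max? blk (fun y => y)).getD 0
      (PySem.List.pyRange 0 (PySem.List.len blk) 1).foldl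
        (fun acc _ => acc ++ [max_val]) u_a) []

-- ===== PORT B =====
-- loop body of Source B's single for-loop (state: out, cnt, cur)
def pvStepB (n : Int) (st : List Int × Int × Int) (x : Int) : List Int × Int × Int :=
  let cur := if st.2.1 = 0 then x else max st.2.2 x
  let cnt := st.2.1 + 1
  if cnt = n then (st.1 ++ PySem.List.pyRepeat [cur] n, 0, cur)
  else (st.1, cnt, cur)

def construct_upper_MBRs_alt (series : List Int) (N : Int) : List Int :=
  let n := PySem.Int.floordiv (PySem.List.len series) N
  ((PySem.List.slice series none (some (n * N))).foldl (pvStepB n) ([], 0, 0)).1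

-- ===== PRECONDITION & SPEC =====
-- Pre_ excludes exactly the inputs where Python A raises: N = 0 (ZeroDivisionError in
-- len(series)//N) and 0 < N with len(series) < N (then n = 0, every block is empty and
-- max([]) raises ValueError). For N < 0 both programs return [].
def Pre_construct_upper_MBRs (series : List Int) (N : Int) : Prop :=
  N < 0 ∨ (0 < N ∧ N ≤ (series.length : Int))
instance (series : List Int) (N : Int) : Decidable (Pre_construct_upper_MBRs series N) := by
  unfold Pre_construct_upper_MBRs; infer_instance
def pvWitness_construct_upper_MBRs : List Int × Int := ([3, 1, 4, 1, 5, 9], 3)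

def Spec_construct_upper_MBRs (series : List Int) (N : Int) (out : List Int) : Prop :=
  out = construct_upper_MBRs_alt series N
instance (series : List Int) (N : Int) (out : List Int) : Decidable (Spec_construct_upper_MBRs series N out) := by
  unfold Spec_construct_upper_MBRs; infer_instance

-- ===== CLAIM (what is proved, stated in full; the proofs are below) =====
def Claim_equal_construct_upper_MBRs : Prop := ∀ (series : List Int) (N : Int), Dom_construct_upper_MBRs series N → Pre_construct_upper_MBRs series N → Spec_construct_upper_MBRs series N (construct_upper_MBRs series N)

-- ===== LEMMAS AND PROOFS =====

-- proof-only intermediate form: per block, slice + max + repeat (used as a bridge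
-- between A's staged passes and B's streaming fold)
def pvMid (series : List Int) (N : Int) : List Int :=
  let n := PySem.Int.floordiv (PySem.List.len series) N
  (PySem.List.pyRange 0 N 1).foldl
    (fun u_a i =>
      let m := (PySem.List.max? (PySem.List.slice series (some (i * n)) (some ((i + 1) * n))) (fun y => y)).getD 0
      u_a ++ PySem.List.pyRepeat [m] n) []

-- map of pyGetD over a range is the slice, when the bounds are in range
lemma map_pyGetD_pyRange_eq_slice (xs : List Int) (a b : Int) (d : Int)
    (ha : 0 ≤ a) (hab : a ≤ b) (hb : b ≤ (xs.length : Int)) :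
    (PySem.List.pyRange a b 1).map (fun j => PySem.List.pyGetD xs j d)
      = PySem.List.slice xs (some a) (some b) := by
  rw [PySem.List.slice_toNat xs ha (le_trans ha hab), PySem.List.pyRange_one]
  apply List.ext_getElem
  · simp; omega
  · intro k h1 h2
    simp only [List.getElem_map, List.getElem_range, List.getElem_take, List.getElem_drop]
    have hk : (k : Int) < b - a := by
      have := h1; simp [List.length_map, List.length_range] at this; omega
    rw [PySem.List.pyGetD_eq_getElem (i := a + (k : Int)) xs d (by omega) (by omega)]
    have hidx : (a + (k : Int)).toNat = a.toNat + k := by omega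
    simp [hidx]

lemma flatten_map_singleton {α β : Type} (l : List α) (f : α → β) :
    (l.map (fun x => [f x])).flatten = l.map f := by
  induction l with
  | nil => simp
  | cons x t ih => simp [ih]

-- A's first phase computes the list of blocks [slice (n*i) (n*(i+1)) | i < k] and n*k
lemma phaseA (series : List Int) (nv : Int) (k : Nat) :
    (PySem.List.pyRange 1 ((k : Int) + 1) 1).foldl
      (fun (st : List (List Int) × Int) i =>
        (st.1 ++ [(PySem.List.pyRange st.2 (nv * i) 1).foldl
          (fun acc j => acc ++ [PySem.List.pyGetD series j 0]) []], nv * i)) ([], 0)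
    = ((PySem.List.pyRange 0 (k : Int) 1).map
        (fun i => (PySem.List.pyRange (nv * i) (nv * (i + 1)) 1).map
          (fun j => PySem.List.pyGetD series j 0)), nv * k) := by
  induction k with
  | zero =>
    simp only [Nat.cast_zero, zero_add, mul_zero]
    rw [PySem.List.pyRange_one_eq_nil (le_refl (1:Int)),
        PySem.List.pyRange_one_eq_nil (le_refl (0:Int))]
    simp
  | succ k ih =>
    have hc : ((k + 1 : Nat) : Int) + 1 = ((k : Int) + 1) + 1 := by push_cast; ring
    rw [hc, PySem.List.pyRange_one_succ_right (by omega : (1:Int) ≤ (k : Int) + 1),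
        List.foldl_append, ih]
    have hc2 : ((k + 1 : Nat) : Int) = (k : Int) + 1 := by push_cast; ring
    rw [hc2, PySem.List.pyRange_one_succ_right (by omega : (0:Int) ≤ (k : Int)),
        List.map_append]
    simp [flatten_map_singleton]

-- appending a constant (len blk) times extends by replicate
lemma foldl_const_append (l : List Int) (c : Int) (u : List Int) :
    l.foldl (fun acc (_ : Int) => acc ++ [c]) u = u ++ List.replicate l.length c := by
  induction l generalizing u with
  | nil => simp
  | cons x t ih => simp [List.foldl, ih, List.replicate_succ]

-- A equals the intermediate per-block form on Pre_
lemma A_eq_mid (series : List Int) (N : Int)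
    (hPre : Pre_construct_upper_MBRs series N) :
    construct_upper_MBRs series N = pvMid series N := by
  unfold construct_upper_MBRs pvMid
  rcases hPre with hN | ⟨hN, hlen⟩
  · -- N < 0 : both loops are over empty ranges
    rw [PySem.List.pyRange_one_eq_nil (by omega : N + 1 ≤ 1),
        PySem.List.pyRange_one_eq_nil (by omega : N ≤ 0)]
    simp [PySem.List.pyRange_one_eq_nil]
  · -- 0 < N, N ≤ len series
    simp only [PySem.List.len_eq]
    set n : Int := PySem.Int.floordiv (series.length : Int) N with hn
    have hn1 : 1 ≤ n := by
      rw [hn, PySem.Int.le_floordiv_iff_mul_le hN]; omega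
    have hnN : n * N ≤ (series.length : Int) := by
      have := (PySem.Int.le_floordiv_iff_mul_le hN (q := n) (a := (series.length : Int))).mp
      rw [hn] at *
      exact this le_rfl
    have hNk : ((N.toNat : Int)) = N := Int.toNat_of_nonneg (by omega)
    rw [show N + 1 = ((N.toNat : Int)) + 1 by rw [hNk]]
    rw [phaseA series n N.toNat]
    rw [hNk]
    set bf : Int → List Int := fun i =>
      (PySem.List.pyRange (n * i) (n * (i + 1)) 1).map
        (fun j => PySem.List.pyGetD series j 0) with hbf
    have hlenls : (((PySem.List.pyRange 0 N 1).map bf).length : Int) = N := by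
      simp [PySem.List.length_pyRange_one]; omega
    rw [hlenls]
    apply PySem.List.foldl_congr_mem
    intro u_a w hw
    rw [PySem.List.mem_pyRange_one] at hw
    have h0w : 0 ≤ w := hw.1
    have hwN : w < N := hw.2
    have hb0 : 0 ≤ n * w := by positivity
    have hbab : n * w ≤ n * (w + 1) := by nlinarith
    have hbub : n * (w + 1) ≤ (series.length : Int) := by nlinarith
    rw [PySem.List.pyGetD_map_pyRange_of_nonneg bf N w [] h0w hwN]
    have hsl := map_pyGetD_pyRange_eq_slice series (n * w) (n * (w + 1)) 0 hb0 hbab hbub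
    have hslen : (PySem.List.slice series (some (n * w)) (some (n * (w + 1)))).length
        = n.toNat := by
      have e1 : n * (w + 1) = n * w + n := by ring
      rw [PySem.List.slice_toNat series hb0 (by omega)]
      simp only [List.length_take, List.length_drop]
      rw [e1] at hbub ⊢
      omega
    simp only [hbf, hsl]
    rw [foldl_const_append, PySem.List.length_pyRange_one, hslen]
    rw [PySem.List.pyRepeat_singleton]
    rw [show w * n = n * w by ring, show (w + 1) * n = n * (w + 1) by ring]
    have hc : (((n.toNat : Int)) - 0).toNat = n.toNat := by omega
    rw [hc]

-- ===== streaming lemmas for B =====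

-- with a nonpositive block size the counter never reaches n: nothing is emitted
lemma stream_nonpos (nv : Int) (hnv : nv ≤ 0) (t : List Int) :
    ∀ (k cur : Int) (out : List Int), 0 ≤ k →
      (t.foldl (pvStepB nv) (out, k, cur)).1 = out := by
  induction t with
  | nil => intro k cur out _; rfl
  | cons x t ih =>
    intro k cur out hk
    simp only [List.foldl_cons, pvStepB]
    rw [if_neg (by omega : ¬ k + 1 = nv)]
    exact ih (k + 1) _ out (by omega)

-- middle of a block (counter k ≥ 1): the fold finishes the block, flushing
-- nv copies of the running maximum
lemma stream_inner (nv : Int) (t : List Int) :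
    ∀ (k cur : Int) (out : List Int), 1 ≤ k → k + t.length = nv → k < nv →
      t.foldl (pvStepB nv) (out, k, cur)
        = (out ++ List.replicate nv.toNat (t.foldl max cur), 0, t.foldl max cur) := by
  induction t with
  | nil => intro k cur out _ hlen hlt; simp at hlen; omega
  | cons x t ih =>
    intro k cur out hk hlen hlt
    simp only [List.length_cons] at hlen
    simp only [List.foldl_cons, pvStepB]
    rw [if_neg (by omega : ¬ k = 0)]
    by_cases h : k + 1 = nv
    · have ht : t = [] := by
        have : t.length = 0 := by push_cast at hlen; omega
        exact List.eq_nil_of_length_eq_zero this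
      subst ht
      rw [if_pos h]
      simp [PySem.List.pyRepeat_singleton]
    · rw [if_neg h]
      rw [ih (k + 1) (max cur x) out (by omega) (by push_cast at hlen ⊢; omega) (by omega)]

-- a full block of length nv starting at counter 0
lemma stream_block (nv : Int) (x : Int) (t : List Int)
    (hb : ((x :: t).length : Int) = nv) (c0 : Int) (out : List Int) :
    (x :: t).foldl (pvStepB nv) (out, 0, c0)
      = (out ++ List.replicate nv.toNat (t.foldl max x), 0, t.foldl max x) := by
  simp only [List.length_cons] at hb
  simp only [List.foldl_cons, pvStepB, if_true]
  by_cases h : (0 : Int) + 1 = nv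
  · have ht : t = [] := by
      have : t.length = 0 := by push_cast at hb; omega
      exact List.eq_nil_of_length_eq_zero this
    subst ht
    rw [if_pos h]
    simp [PySem.List.pyRepeat_singleton]
  · rw [if_neg h]
    rw [stream_inner nv t (0 + 1) x out (by omega) (by push_cast at hb ⊢; omega) (by push_cast at hb; omega)]

-- the streaming fold over the first nv*k elements produces exactly the first k
-- per-block segments of pvMid's fold
lemma stream_prefix (series : List Int) (nv : Int) (h1 : 1 ≤ nv) :
    ∀ (k : Nat), nv * (k : Int) ≤ (series.length : Int) →
      ∃ c, (series.take ((nv * (k : Int)).toNat)).foldl (pvStepB nv) ([], 0, 0)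
        = ((PySem.List.pyRange 0 (k : Int) 1).foldl
            (fun u_a i =>
              u_a ++ PySem.List.pyRepeat
                [(PySem.List.max? (PySem.List.slice series (some (i * nv)) (some ((i + 1) * nv)))
                   (fun y => y)).getD 0] nv) [], 0, c) := by
  intro k
  induction k with
  | zero =>
    intro _
    refine ⟨0, ?_⟩
    simp only [Nat.cast_zero, mul_zero]
    rw [PySem.List.pyRange_one_eq_nil (le_refl (0:Int))]
    simp
  | succ k ih =>
    intro hbound
    have hk0 : (0:Int) ≤ nv * k := by positivity
    have hstep : nv * ((k : Int) + 1) = nv * k + nv := by ring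
    have hbk : nv * (k : Int) ≤ (series.length : Int) := by push_cast at hbound; nlinarith
    obtain ⟨c, hc⟩ := ih hbk
    have htn : (nv * ((k+1 : Nat) : Int)).toNat = (nv * (k : Int)).toNat + nv.toNat := by
      push_cast; rw [show nv * ((k : Int) + 1) = nv * k + nv by ring]; omega
    rw [htn, List.take_add, List.foldl_append, hc]
    -- the (k+1)-th block
    set blk := (series.drop ((nv * (k : Int)).toNat)).take nv.toNat with hblk
    have hlblk : blk.length = nv.toNat := by
      rw [hblk]
      simp only [List.length_take, List.length_drop]
      push_cast at hbound
      omega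
    have hne : blk ≠ [] := by
      intro h; rw [h] at hlblk; simp at hlblk; omega
    obtain ⟨x, t, hxt⟩ := List.exists_cons_of_ne_nil hne
    have hlen2 : (((x :: t).length : Int)) = nv := by
      rw [← hxt, hlblk]; omega
    rw [hxt, stream_block nv x t hlen2 c _]
    refine ⟨t.foldl max x, ?_⟩
    have hcast : ((k + 1 : Nat) : Int) = (k : Int) + 1 := by push_cast; ring
    rw [hcast, PySem.List.pyRange_one_succ_right (by omega : (0:Int) ≤ (k : Int)),
        List.foldl_append]
    simp only [List.foldl_cons, List.foldl_nil]
    -- slice for block k equals blk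
    have hsl : PySem.List.slice series (some ((k : Int) * nv)) (some (((k : Int) + 1) * nv))
        = blk := by
      rw [PySem.List.slice_toNat series (by positivity) (by positivity), hblk]
      rw [show (k : Int) * nv = nv * k by ring, show ((k : Int) + 1) * nv = nv * k + nv by ring]
      congr 1
      omega
    rw [hsl, hxt, PySem.List.max?_id_cons]
    simp [PySem.List.pyRepeat_singleton]

-- pvMid equals B on Pre_
lemma mid_eq_alt (series : List Int) (N : Int)
    (hPre : Pre_construct_upper_MBRs series N) :
    pvMid series N = construct_upper_MBRs_alt series N := by
  unfold pvMid construct_upper_MBRs_alt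
  simp only [PySem.List.len_eq]
  set n : Int := PySem.Int.floordiv (series.length : Int) N with hn
  rcases hPre with hN | ⟨hN, hlen⟩
  · -- N < 0 : mid's range is empty; B's counter never reaches n ≤ 0
    have hn0 : n ≤ 0 := by
      by_contra h
      have h1 : 1 ≤ n := by omega
      have hfl : PySem.Int.floordiv (series.length : Int) N * N + PySem.Int.mod (series.length : Int) N = (series.length : Int) :=
        PySem.Int.floordiv_mul_add_mod _ _
      have hmb := PySem.Int.mod_neg_bounds (a := (series.length : Int)) (b := N) (by omega)
      rw [← hn] at hfl
      have hlen0 : (0:Int) ≤ (series.length : Int) := by positivity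
      nlinarith
    rw [PySem.List.pyRange_one_eq_nil (by omega : N ≤ 0)]
    simp only [List.foldl_nil]
    exact (stream_nonpos n hn0 _ 0 0 [] le_rfl).symm
  · -- 0 < N, N ≤ len
    have hn1 : 1 ≤ n := by
      rw [hn, PySem.Int.le_floordiv_iff_mul_le hN]; omega
    have hnN : n * N ≤ (series.length : Int) := by
      have := (PySem.Int.le_floordiv_iff_mul_le hN (q := n) (a := (series.length : Int))).mp
      rw [hn] at *
      exact this le_rfl
    have hNk : ((N.toNat : Int)) = N := Int.toNat_of_nonneg (by omega)
    have hb : n * ((N.toNat : Nat) : Int) ≤ (series.length : Int) := by rw [hNk]; exact hnN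
    obtain ⟨c, hc⟩ := stream_prefix series n hn1 N.toNat hb
    rw [PySem.List.slice_to series (by rw [← hNk] at hnN ⊢; positivity)]
    rw [show n * N = n * ((N.toNat : Nat) : Int) by rw [hNk]]
    rw [hc, hNk]

-- ===== VERDICT (by name: the statements are the Claim_ definitions above) =====
theorem construct_upper_MBRs_spec : Claim_equal_construct_upper_MBRs := by
  intro series N _ hPre
  unfold Spec_construct_upper_MBRs
  rw [A_eq_mid series N hPre, mid_eq_alt series N hPre]
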